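-- pv_equiv track=rewrite | github.com/kasirajans/MyKeycloak-config-tf | keycloak_analyzer.py | categorize_keycloak_resources
-- ===== SOURCE A (Python) =====
-- from typing import Dict, List, Any, Optional
--
-- def categorize_keycloak_resources(resources: List[Dict]) -> Dict[str, List[Dict]]:
--     categories = {
--         'realms': [],
--         'users': [],
--         'clients': [],
--         'roles': [],
--         'groups': [],
--         'identity_providers': [],
--         'authentication_flows': [],
--         'scopes': [],
--         'mappers': [],
--         'other': []
--     }
--     for resource in resources:
--         resource_type = resource.get('type', '')
--         if 'realm' in resource_type and resource_type != 'keycloak_user':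
--             categories['realms'].append(resource)
--         elif 'user' in resource_type:
--             categories['users'].append(resource)
--         elif 'client' in resource_type:
--             categories['clients'].append(resource)
--         elif 'role' in resource_type:
--             categories['roles'].append(resource)
--         elif 'group' in resource_type:
--             categories['groups'].append(resource)
--         elif 'identity_provider' in resource_type or 'idp' in resource_type:
--             categories['identity_providers'].append(resource)
--         elif 'authentication' in resource_type or 'flow' in resource_type:
--             categories['authentication_flows'].append(resource)
--         elif 'scope' in resource_type:
--             categories['scopes'].append(resource)
--         elif 'mapper' in resource_type:
--             categories['mappers'].append(resource)
--         else:
--             categories['other'].append(resource)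
--     return categories
-- ===== SOURCE B (Python) =====
-- RULES = [
--     ('realms', ('realm',)),
--     ('users', ('user',)),
--     ('clients', ('client',)),
--     ('roles', ('role',)),
--     ('groups', ('group',)),
--     ('identity_providers', ('identity_provider', 'idp')),
--     ('authentication_flows', ('authentication', 'flow')),
--     ('scopes', ('scope',)),
--     ('mappers', ('mapper',)),
-- ]
--
--
-- def _classify(rtype):
--     for name, keywords in RULES:
--         if any(k in rtype for k in keywords):
--             return name
--     return 'other'
--
--
-- def categorize_keycloak_resources(resources):
--     labels = [_classify(r.get('type', '')) for r in resources]
--     return {name: [r for r, lab in zip(resources, labels) if lab == name]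
--             for name in [n for n, _ in RULES] + ['other']}
-- ===== Notes on version B (the rewrite author's own statement) =====
-- stated objective: idiomatic
-- what changed: Replaces the single-pass if-elif ladder with appends into a mutable dict by a declarative ordered rule table: each resource is labelled by the first matching rule, and the result dict is built per category by filtering the labelled list (the always-true 'keycloak_user' guard on the realm branch is dropped, since 'realm' is never a substring of 'keycloak_user').
import Mathlib
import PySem

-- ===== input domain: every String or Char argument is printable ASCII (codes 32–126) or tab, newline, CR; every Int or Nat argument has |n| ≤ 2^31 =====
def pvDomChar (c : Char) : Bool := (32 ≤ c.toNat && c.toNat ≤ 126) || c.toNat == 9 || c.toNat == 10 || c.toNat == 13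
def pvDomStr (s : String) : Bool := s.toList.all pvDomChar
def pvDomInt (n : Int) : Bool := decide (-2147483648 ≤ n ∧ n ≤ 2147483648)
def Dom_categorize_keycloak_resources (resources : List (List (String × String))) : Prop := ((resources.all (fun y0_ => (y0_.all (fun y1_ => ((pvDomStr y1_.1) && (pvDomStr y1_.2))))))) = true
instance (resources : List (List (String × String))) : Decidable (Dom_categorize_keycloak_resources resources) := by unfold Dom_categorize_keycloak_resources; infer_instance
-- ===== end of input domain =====

-- B replaces A's if-elif ladder with appends into a mutable dict by an ordered rule table:
-- label each resource by the first matching rule, then build each category by filtering (idiomatic; same cost).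

-- ===== PORT A =====
-- the loop body: the if/elif chain appending the resource to one bucket
def pvAStep (cats : PySem.Dict String (List (List (String × String)))) (r : List (String × String)) : PySem.Dict String (List (List (String × String))) :=
  let t := PySem.Dict.getD ⟨r⟩ "type" ""
  if PySem.Str.isIn "realm" t && !(t == "keycloak_user") then cats.modify "realms" [] (· ++ [r])
  else if PySem.Str.isIn "user" t then cats.modify "users" [] (· ++ [r])
  else if PySem.Str.isIn "client" t then cats.modify "clients" [] (· ++ [r])
  else if PySem.Str.isIn "role" t then cats.modify "roles" [] (· ++ [r])
  else if PySem.Str.isIn "group" t then cats.modify "groups" [] (· ++ [r])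
  else if PySem.Str.isIn "identity_provider" t || PySem.Str.isIn "idp" t then cats.modify "identity_providers" [] (· ++ [r])
  else if PySem.Str.isIn "authentication" t || PySem.Str.isIn "flow" t then cats.modify "authentication_flows" [] (· ++ [r])
  else if PySem.Str.isIn "scope" t then cats.modify "scopes" [] (· ++ [r])
  else if PySem.Str.isIn "mapper" t then cats.modify "mappers" [] (· ++ [r])
  else cats.modify "other" [] (· ++ [r])

def categorize_keycloak_resources (resources : List (List (String × String))) : List (String × List (List (String × String))) :=
  let categories : PySem.Dict String (List (List (String × String))) :=
    ⟨[("realms", []), ("users", []), ("clients", []), ("roles", []), ("groups", []),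
      ("identity_providers", []), ("authentication_flows", []), ("scopes", []), ("mappers", []), ("other", [])]⟩
  (resources.foldl pvAStep categories).items

-- ===== PORT B =====
def pvRules : List (String × List String) :=
  [("realms", ["realm"]), ("users", ["user"]), ("clients", ["client"]), ("roles", ["role"]),
   ("groups", ["group"]), ("identity_providers", ["identity_provider", "idp"]),
   ("authentication_flows", ["authentication", "flow"]), ("scopes", ["scope"]), ("mappers", ["mapper"])]

-- _classify: scan the rules, return the first whose any keyword is a substring of rtype
def pvClassify : List (String × List String) → String → String
  | [], _ => "other"
  | (name, kws) :: rest, t => if kws.any (fun k => PySem.Str.isIn k t) then name else pvClassify rest t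

def categorize_keycloak_resources_alt (resources : List (List (String × String))) : List (String × List (List (String × String))) :=
  let labels := resources.map (fun r => pvClassify pvRules (PySem.Dict.getD ⟨r⟩ "type" ""))
  (pvRules.map (·.1) ++ ["other"]).map
    (fun name => (name, ((resources.zip labels).filter (fun p => p.2 == name)).map (·.1)))

-- ===== PRECONDITION & SPEC =====
def Spec_categorize_keycloak_resources (resources : List (List (String × String))) (out : List (String × List (List (String × String)))) : Prop := out = categorize_keycloak_resources_alt resources
instance (resources : List (List (String × String))) (out : List (String × List (List (String × String)))) : Decidable (Spec_categorize_keycloak_resources resources out) := by unfold Spec_categorize_keycloak_resources; infer_instance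

-- ===== CLAIM (what is proved, stated in full; the proofs are below) =====
def Claim_equal_categorize_keycloak_resources : Prop := ∀ (resources : List (List (String × String))), Dom_categorize_keycloak_resources resources → Spec_categorize_keycloak_resources resources (categorize_keycloak_resources resources)

-- ===== LEMMAS AND PROOFS =====

-- the label A's if/elif chain assigns to a type string
def pvLabelA (t : String) : String :=
  if PySem.Str.isIn "realm" t && !(t == "keycloak_user") then "realms"
  else if PySem.Str.isIn "user" t then "users"
  else if PySem.Str.isIn "client" t then "clients"
  else if PySem.Str.isIn "role" t then "roles"
  else if PySem.Str.isIn "group" t then "groups"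
  else if PySem.Str.isIn "identity_provider" t || PySem.Str.isIn "idp" t then "identity_providers"
  else if PySem.Str.isIn "authentication" t || PySem.Str.isIn "flow" t then "authentication_flows"
  else if PySem.Str.isIn "scope" t then "scopes"
  else if PySem.Str.isIn "mapper" t then "mappers"
  else "other"

def pvLab (r : List (String × String)) : String := pvLabelA (PySem.Dict.getD ⟨r⟩ "type" "")

-- the one semantic gap between the two ladders: A's 'keycloak_user' guard is vacuous
lemma pvLabelA_eq_classify (t : String) : pvLabelA t = pvClassify pvRules t := by
  by_cases ht : t = "keycloak_user"
  · subst ht; decide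
  · have h : (t == "keycloak_user") = false := by simp [ht]
    simp only [pvLabelA, pvRules, pvClassify, h, Bool.not_false, Bool.and_true, List.any_cons, List.any_nil, Bool.or_false]

-- loop invariant for A's fold over the 10-bucket dict
lemma pvLoopA_inv (rs : List (List (String × String)))
    (l₁ l₂ l₃ l₄ l₅ l₆ l₇ l₈ l₉ l₀ : List (List (String × String))) :
    rs.foldl pvAStep ⟨[("realms", l₁), ("users", l₂), ("clients", l₃), ("roles", l₄), ("groups", l₅),
      ("identity_providers", l₆), ("authentication_flows", l₇), ("scopes", l₈), ("mappers", l₉), ("other", l₀)]⟩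
    = ⟨[
        ("realms", l₁ ++ rs.filter (fun r => pvLab r == "realms")),
        ("users", l₂ ++ rs.filter (fun r => pvLab r == "users")),
        ("clients", l₃ ++ rs.filter (fun r => pvLab r == "clients")),
        ("roles", l₄ ++ rs.filter (fun r => pvLab r == "roles")),
        ("groups", l₅ ++ rs.filter (fun r => pvLab r == "groups")),
        ("identity_providers", l₆ ++ rs.filter (fun r => pvLab r == "identity_providers")),
        ("authentication_flows", l₇ ++ rs.filter (fun r => pvLab r == "authentication_flows")),
        ("scopes", l₈ ++ rs.filter (fun r => pvLab r == "scopes")),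
        ("mappers", l₉ ++ rs.filter (fun r => pvLab r == "mappers")),
        ("other", l₀ ++ rs.filter (fun r => pvLab r == "other"))]⟩ := by
  induction rs generalizing l₁ l₂ l₃ l₄ l₅ l₆ l₇ l₈ l₉ l₀ with
  | nil => simp
  | cons r rs ih =>
    rw [List.foldl_cons]
    simp only [pvAStep]
    split_ifs with h1 h2 h3 h4 h5 h6 h7 h8 h9
    · refine (ih (l₁ ++ [r]) l₂ l₃ l₄ l₅ l₆ l₇ l₈ l₉ l₀).trans ?_
      have hl : pvLab r = "realms" := by unfold pvLab pvLabelA; rw [if_pos h1]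
      simp [hl]
    · refine (ih l₁ (l₂ ++ [r]) l₃ l₄ l₅ l₆ l₇ l₈ l₉ l₀).trans ?_
      have hl : pvLab r = "users" := by unfold pvLab pvLabelA; rw [if_neg h1, if_pos h2]
      simp [hl]
    · refine (ih l₁ l₂ (l₃ ++ [r]) l₄ l₅ l₆ l₇ l₈ l₉ l₀).trans ?_
      have hl : pvLab r = "clients" := by unfold pvLab pvLabelA; rw [if_neg h1, if_neg h2, if_pos h3]
      simp [hl]
    · refine (ih l₁ l₂ l₃ (l₄ ++ [r]) l₅ l₆ l₇ l₈ l₉ l₀).trans ?_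
      have hl : pvLab r = "roles" := by unfold pvLab pvLabelA; rw [if_neg h1, if_neg h2, if_neg h3, if_pos h4]
      simp [hl]
    · refine (ih l₁ l₂ l₃ l₄ (l₅ ++ [r]) l₆ l₇ l₈ l₉ l₀).trans ?_
      have hl : pvLab r = "groups" := by unfold pvLab pvLabelA; rw [if_neg h1, if_neg h2, if_neg h3, if_neg h4, if_pos h5]
      simp [hl]
    · refine (ih l₁ l₂ l₃ l₄ l₅ (l₆ ++ [r]) l₇ l₈ l₉ l₀).trans ?_
      have hl : pvLab r = "identity_providers" := by unfold pvLab pvLabelA; rw [if_neg h1, if_neg h2, if_neg h3, if_neg h4, if_neg h5, if_pos h6]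
      simp [hl]
    · refine (ih l₁ l₂ l₃ l₄ l₅ l₆ (l₇ ++ [r]) l₈ l₉ l₀).trans ?_
      have hl : pvLab r = "authentication_flows" := by unfold pvLab pvLabelA; rw [if_neg h1, if_neg h2, if_neg h3, if_neg h4, if_neg h5, if_neg h6, if_pos h7]
      simp [hl]
    · refine (ih l₁ l₂ l₃ l₄ l₅ l₆ l₇ (l₈ ++ [r]) l₉ l₀).trans ?_
      have hl : pvLab r = "scopes" := by unfold pvLab pvLabelA; rw [if_neg h1, if_neg h2, if_neg h3, if_neg h4, if_neg h5, if_neg h6, if_neg h7, if_pos h8]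
      simp [hl]
    · refine (ih l₁ l₂ l₃ l₄ l₅ l₆ l₇ l₈ (l₉ ++ [r]) l₀).trans ?_
      have hl : pvLab r = "mappers" := by unfold pvLab pvLabelA; rw [if_neg h1, if_neg h2, if_neg h3, if_neg h4, if_neg h5, if_neg h6, if_neg h7, if_neg h8, if_pos h9]
      simp [hl]
    · refine (ih l₁ l₂ l₃ l₄ l₅ l₆ l₇ l₈ l₉ (l₀ ++ [r])).trans ?_
      have hl : pvLab r = "other" := by unfold pvLab pvLabelA; rw [if_neg h1, if_neg h2, if_neg h3, if_neg h4, if_neg h5, if_neg h6, if_neg h7, if_neg h8, if_neg h9]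
      simp [hl]

-- zip-with-labels filtering equals direct filtering
lemma pvZipFilter (xs : List (List (String × String))) (f : List (String × String) → String) (name : String) :
    ((xs.zip (xs.map f)).filter (fun p => p.2 == name)).map (·.1) = xs.filter (fun x => f x == name) := by
  induction xs with
  | nil => rfl
  | cons x xs ih =>
    simp only [List.map_cons, List.zip_cons_cons, List.filter_cons]
    by_cases h : f x == name <;> simp [h, ih]

-- ===== VERDICT (by name: the statement is the Claim_ definition above) =====
theorem categorize_keycloak_resources_spec : Claim_equal_categorize_keycloak_resources := by
  intro resources _
  unfold Spec_categorize_keycloak_resources categorize_keycloak_resources categorize_keycloak_resources_alt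
  dsimp only
  rw [pvLoopA_inv]
  simp only [pvRules, List.map_cons, List.map_nil, List.cons_append, List.nil_append,
    pvZipFilter, pvLab, pvLabelA_eq_classify]
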